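-- pv_equiv track=rewrite | github.com/YehudaShani/Authentication-Simulations | helpers/wallet_enumerations.py | enumerateStaticSubWallets
-- ===== SOURCE A (Python) =====
-- import copy
--
-- def isCovered(keyCombination, wallet):
--     """Is any of the wallet combinations covered by the keyCombination?
--     (Then keyCombination is redundant)
--     """
--     for walletCombination in wallet:
--         if walletCombination & keyCombination == walletCombination:
--             return True
--
--     return False
--
-- def enumerateStaticSubWallets(baseWallet, prevCombi, keyCount):
--     wallets = []
--     for currCombi in range(prevCombi + 1, 2 ** keyCount):
--         if not isCovered(currCombi, baseWallet):
--             currWallet = baseWallet + [currCombi]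
--             # # Skip this combination:
--             # wallets += enumerateStaticSubWallets(baseWallet, currCombi, keyCount)
--             # Just this combination:
--             wallets += [copy.copy(currWallet)]
--             # This combination and all its subwallets:
--             wallets += enumerateStaticSubWallets(currWallet, currCombi, keyCount)
--
--     return wallets
-- ===== SOURCE B (Python) =====
-- def isCovered(keyCombination, wallet):
--     """Is any of the wallet combinations covered by the keyCombination?"""
--     return any(wc & keyCombination == wc for wc in wallet)
--
-- def enumerateStaticSubWallets(baseWallet, prevCombi, keyCount):
--     # Iterative explicit-stack DFS instead of recursion; same preorder output.
--     bound = 2 ** keyCount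
--     out = []
--     stack = [(baseWallet, prevCombi + 1)]
--     while stack:
--         wallet, c = stack[-1]
--         while c < bound and isCovered(c, wallet):
--             c += 1
--         if c >= bound:
--             stack.pop()
--         else:
--             stack[-1] = (wallet, c + 1)
--             newWallet = wallet + [c]
--             out.append(newWallet)
--             stack.append((newWallet, c + 1))
--     return out
-- ===== Notes on version B (the rewrite author's own statement) =====
-- stated objective: alternative
-- what changed: Replaces A's recursive DFS over sub-wallets by an iterative DFS with an explicit stack of (wallet, next-combination) frames, advancing the top frame's counter past covered combinations and pushing the child frame so the same preorder output is appended to a single result list.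
import Mathlib
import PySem

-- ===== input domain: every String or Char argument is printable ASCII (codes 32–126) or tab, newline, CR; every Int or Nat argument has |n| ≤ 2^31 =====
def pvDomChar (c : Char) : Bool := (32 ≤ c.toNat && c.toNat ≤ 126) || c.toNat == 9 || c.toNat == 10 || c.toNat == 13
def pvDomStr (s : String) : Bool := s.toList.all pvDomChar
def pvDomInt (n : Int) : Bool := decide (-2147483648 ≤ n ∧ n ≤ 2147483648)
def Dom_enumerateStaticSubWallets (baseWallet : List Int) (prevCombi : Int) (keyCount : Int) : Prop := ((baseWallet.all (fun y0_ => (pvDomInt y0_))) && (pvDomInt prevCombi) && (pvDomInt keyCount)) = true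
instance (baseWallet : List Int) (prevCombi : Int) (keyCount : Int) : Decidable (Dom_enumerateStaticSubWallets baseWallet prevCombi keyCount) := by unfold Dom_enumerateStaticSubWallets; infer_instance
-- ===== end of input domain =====

-- B replaces A's recursive DFS over sub-wallets by an explicit-stack iterative DFS producing the same preorder output (objective: alternative, same cost).
-- Both ports carry a Nat fuel argument that only makes the recursion total; it is set so it never runs out.

-- ===== PORT A =====
-- isCovered: the early-return for-loop is List.any (first match wins, same Bool)
def pvIsCovered (keyCombination : Int) (wallet : List Int) : Bool :=
  wallet.any (fun walletCombination => PySem.Int.band walletCombination keyCombination == walletCombination)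

-- A's for-loop over range(prevCombi+1, 2**keyCount) as recursion on currCombi; the recursive call
-- enumerateStaticSubWallets(currWallet, currCombi, keyCount) is the same loop starting at
-- currCombi+1 with the same bound, inlined. Fuel (bound - currCombi).toNat is exact.
def pvEnumLoopA : Nat → List Int → Int → Int → List (List Int)
  | 0, _, _, _ => []
  | fuel + 1, baseWallet, currCombi, bound =>
    if currCombi < bound then
      (if pvIsCovered currCombi baseWallet then []
       else
         let currWallet := baseWallet ++ [currCombi]
         currWallet :: pvEnumLoopA fuel currWallet (currCombi + 1) bound)
      ++ pvEnumLoopA fuel baseWallet (currCombi + 1) bound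
    else []

def enumerateStaticSubWallets (baseWallet : List Int) (prevCombi : Int) (keyCount : Int) : List (List Int) :=
  pvEnumLoopA ((2 : Int) ^ keyCount.toNat - (prevCombi + 1)).toNat baseWallet (prevCombi + 1) ((2 : Int) ^ keyCount.toNat)

-- ===== PORT B =====
-- inner `while c < bound and isCovered(c, wallet): c += 1`; fuel (bound - c).toNat is exact
def pvFindNext : Nat → List Int → Int → Int → Int
  | 0, _, c, _ => c
  | fuel + 1, wallet, c, bound =>
    if c < bound ∧ pvIsCovered c wallet then pvFindNext fuel wallet (c + 1) bound else c

-- the outer while-loop over the explicit stack (head of the list = top of the stack);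
-- fuel 3^(bound - (prevCombi+1)).toNat dominates the number of iterations and never runs out
def pvDfs : Nat → Int → List (List Int × Int) → List (List Int) → List (List Int)
  | 0, _, _, out => out
  | _ + 1, _, [], out => out
  | fuel + 1, bound, (wallet, c0) :: rest, out =>
    let c := pvFindNext (bound - c0).toNat wallet c0 bound
    if bound ≤ c then pvDfs fuel bound rest out
    else
      let newWallet := wallet ++ [c]
      pvDfs fuel bound ((newWallet, c + 1) :: (wallet, c + 1) :: rest) (out ++ [newWallet])

def enumerateStaticSubWallets_alt (baseWallet : List Int) (prevCombi : Int) (keyCount : Int) : List (List Int) :=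
  pvDfs (3 ^ ((2 : Int) ^ keyCount.toNat - (prevCombi + 1)).toNat) ((2 : Int) ^ keyCount.toNat)
    [(baseWallet, prevCombi + 1)] []

-- ===== PRECONDITION & SPEC =====
-- Pre_ excludes keyCount < 0, on which Python's range(prevCombi+1, 2**keyCount) gets a float bound and raises TypeError.
def Pre_enumerateStaticSubWallets (baseWallet : List Int) (prevCombi : Int) (keyCount : Int) : Prop :=
  0 ≤ keyCount
instance (baseWallet : List Int) (prevCombi : Int) (keyCount : Int) : Decidable (Pre_enumerateStaticSubWallets baseWallet prevCombi keyCount) := by unfold Pre_enumerateStaticSubWallets; infer_instance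

def pvWitness_enumerateStaticSubWallets : List Int × Int × Int := ([1, 2], 0, 3)

def Spec_enumerateStaticSubWallets (baseWallet : List Int) (prevCombi : Int) (keyCount : Int) (out : List (List Int)) : Prop := out = enumerateStaticSubWallets_alt baseWallet prevCombi keyCount
instance (baseWallet : List Int) (prevCombi : Int) (keyCount : Int) (out : List (List Int)) : Decidable (Spec_enumerateStaticSubWallets baseWallet prevCombi keyCount out) := by unfold Spec_enumerateStaticSubWallets; infer_instance

-- ===== CLAIM (what is proved, stated in full; the proofs are below) =====
def Claim_equal_enumerateStaticSubWallets : Prop := ∀ (baseWallet : List Int) (prevCombi : Int) (keyCount : Int), Dom_enumerateStaticSubWallets baseWallet prevCombi keyCount → Pre_enumerateStaticSubWallets baseWallet prevCombi keyCount → Spec_enumerateStaticSubWallets baseWallet prevCombi keyCount (enumerateStaticSubWallets baseWallet prevCombi keyCount)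
-- ===== LEMMAS AND PROOFS =====

-- the fuel is irrelevant once it covers (bound - c).toNat
theorem pvEnumLoopA_fuel (f1 : Nat) : ∀ (f2 : Nat) (w : List Int) (c b : Int),
    (b - c).toNat ≤ f1 → (b - c).toNat ≤ f2 →
    pvEnumLoopA f1 w c b = pvEnumLoopA f2 w c b := by
  induction f1 with
  | zero =>
    intro f2 w c b h1 h2
    have hcb : ¬ c < b := by omega
    cases f2 with
    | zero => rfl
    | succ f2 => simp [pvEnumLoopA, hcb]
  | succ f1 ih =>
    intro f2 w c b h1 h2
    cases f2 with
    | zero =>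
      have hcb : ¬ c < b := by omega
      simp [pvEnumLoopA, hcb]
    | succ f2 =>
      simp only [pvEnumLoopA]
      by_cases hcb : c < b
      · have hf1 : (b - (c + 1)).toNat ≤ f1 := by omega
        have hf2 : (b - (c + 1)).toNat ≤ f2 := by omega
        rw [ih f2 _ _ _ hf1 hf2, ih f2 _ _ _ hf1 hf2]
      · simp [hcb]

theorem pvFindNext_ge (fuel : Nat) : ∀ (w : List Int) (c b : Int), c ≤ pvFindNext fuel w c b := by
  induction fuel with
  | zero => intro w c b; simp [pvFindNext]
  | succ fuel ih =>
    intro w c b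
    rw [pvFindNext]
    split_ifs with h
    · have := ih w (c + 1) b; omega
    · omega

-- one macro-step of A's loop, phrased the way B's outer loop takes it: skip covered
-- combinations to the next uncovered one, then either stop or emit the child and both tails
theorem pvEnumLoopA_step (fuel : Nat) : ∀ (w : List Int) (c b : Int), (b - c).toNat ≤ fuel →
    pvEnumLoopA fuel w c b =
      (if b ≤ pvFindNext (b - c).toNat w c b then ([] : List (List Int))
       else
         (w ++ [pvFindNext (b - c).toNat w c b]) ::
           (pvEnumLoopA (b - (pvFindNext (b - c).toNat w c b + 1)).toNat (w ++ [pvFindNext (b - c).toNat w c b]) (pvFindNext (b - c).toNat w c b + 1) b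
            ++ pvEnumLoopA (b - (pvFindNext (b - c).toNat w c b + 1)).toNat w (pvFindNext (b - c).toNat w c b + 1) b)) := by
  induction fuel with
  | zero =>
    intro w c b h
    have h0 : (b - c).toNat = 0 := by omega
    rw [h0]
    simp only [pvEnumLoopA, pvFindNext]
    rw [if_pos (by omega : b ≤ c)]
  | succ fuel ih =>
    intro w c b h
    by_cases hcb : c < b
    · obtain ⟨k, hk⟩ : ∃ k, (b - c).toNat = k + 1 := ⟨(b - (c + 1)).toNat, by omega⟩
      have hk' : (b - (c + 1)).toNat = k := by omega
      rw [hk]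
      rw [pvFindNext]
      by_cases hcov : pvIsCovered c w = true
      · rw [if_pos (show c < b ∧ pvIsCovered c w = true from ⟨hcb, hcov⟩)]
        have hlhs : pvEnumLoopA (fuel + 1) w c b = pvEnumLoopA fuel w (c + 1) b := by
          simp [pvEnumLoopA, hcb, hcov]
        rw [hlhs, ih w (c + 1) b (by omega), hk']
      · rw [if_neg (show ¬ (c < b ∧ pvIsCovered c w = true) by simp [hcov])]
        rw [if_neg (by omega : ¬ b ≤ c)]
        simp only [pvEnumLoopA, if_pos hcb, hcov, if_false, Bool.false_eq_true]
        rw [pvEnumLoopA_fuel fuel (b - (c + 1)).toNat _ _ _ (by omega) (by omega),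
            pvEnumLoopA_fuel fuel (b - (c + 1)).toNat _ _ _ (by omega) (by omega)]
        simp
    · have h0 : (b - c).toNat = 0 := by omega
      rw [h0]
      simp only [pvEnumLoopA, pvFindNext]
      rw [if_neg hcb, if_pos (by omega : b ≤ c)]
  
-- measure dominating the number of iterations of B's outer loop
def pvMeasure (bound : Int) (stack : List (List Int × Int)) : Nat :=
  (stack.map (fun p => 3 ^ (bound - p.2).toNat)).sum

-- B's loop, run on any stack with sufficient fuel, appends A's enumeration of every frame
theorem pvDfs_eq (fuelD : Nat) : ∀ (b : Int) (stack : List (List Int × Int)) (out : List (List Int)),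
    pvMeasure b stack ≤ fuelD →
    pvDfs fuelD b stack out
      = out ++ (stack.map (fun p => pvEnumLoopA (b - p.2).toNat p.1 p.2 b)).flatten := by
  induction fuelD with
  | zero =>
    intro b stack out h
    cases stack with
    | nil => simp [pvDfs]
    | cons p rest =>
      exfalso
      have h1 : 1 ≤ 3 ^ (b - p.2).toNat := Nat.one_le_pow _ _ (by norm_num)
      simp only [pvMeasure, List.map_cons, List.sum_cons] at h
      omega
  | succ fuelD ih =>
    intro b stack out h
    cases stack with
    | nil => simp [pvDfs]
    | cons p rest =>
      obtain ⟨w, c0⟩ := p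
      have hμ : pvMeasure b ((w, c0) :: rest) = 3 ^ (b - c0).toNat + pvMeasure b rest := by
        simp [pvMeasure]
      rw [pvDfs]
      have hone : 1 ≤ 3 ^ (b - c0).toNat := Nat.one_le_pow _ _ (by norm_num)
      by_cases hstop : b ≤ pvFindNext (b - c0).toNat w c0 b
      · rw [if_pos hstop, ih b rest out (by omega)]
        have h0 : pvEnumLoopA (b - c0).toNat w c0 b = [] := by
          rw [pvEnumLoopA_step _ _ _ _ (le_refl _), if_pos hstop]
        simp [h0]
      · rw [if_neg hstop]
        have hge : c0 ≤ pvFindNext (b - c0).toNat w c0 b := pvFindNext_ge _ w c0 b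
        have hlt : pvFindNext (b - c0).toNat w c0 b < b := by omega
        -- fuel bookkeeping: the two new frames weigh strictly less than the frame they replace
        have hpow : 3 ^ ((b - (pvFindNext (b - c0).toNat w c0 b + 1)).toNat + 1) ≤ 3 ^ (b - c0).toNat :=
          Nat.pow_le_pow_right (by norm_num) (by omega)
        have hpow' := Nat.pow_succ 3 ((b - (pvFindNext (b - c0).toNat w c0 b + 1)).toNat)
        have hone' : 1 ≤ 3 ^ (b - (pvFindNext (b - c0).toNat w c0 b + 1)).toNat := Nat.one_le_pow _ _ (by norm_num)
        have hμ' : pvMeasure b ((w ++ [pvFindNext (b - c0).toNat w c0 b], pvFindNext (b - c0).toNat w c0 b + 1) :: (w, pvFindNext (b - c0).toNat w c0 b + 1) :: rest) ≤ fuelD := by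
          simp only [pvMeasure, List.map_cons, List.sum_cons] at h ⊢
          omega
        rw [ih b _ _ hμ']
        have h0 : pvEnumLoopA (b - c0).toNat w c0 b
            = (w ++ [pvFindNext (b - c0).toNat w c0 b]) ::
                (pvEnumLoopA (b - (pvFindNext (b - c0).toNat w c0 b + 1)).toNat (w ++ [pvFindNext (b - c0).toNat w c0 b]) (pvFindNext (b - c0).toNat w c0 b + 1) b
                 ++ pvEnumLoopA (b - (pvFindNext (b - c0).toNat w c0 b + 1)).toNat w (pvFindNext (b - c0).toNat w c0 b + 1) b) := by
          rw [pvEnumLoopA_step _ _ _ _ (le_refl _), if_neg hstop]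
        simp [h0]

-- ===== VERDICT (by name: the statement is the Claim_ definition above) =====
theorem enumerateStaticSubWallets_spec : Claim_equal_enumerateStaticSubWallets := by
  intro baseWallet prevCombi keyCount _ _
  unfold Spec_enumerateStaticSubWallets enumerateStaticSubWallets enumerateStaticSubWallets_alt
  rw [pvDfs_eq _ _ _ _ (by simp [pvMeasure])]
  simp
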